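-- pv_equiv track=rewrite | github.com/sasilver75/leetcode | 150TopQuestionsRedux/medium/454_4SumII.py | fourSumCountNaive
-- ===== SOURCE A (Python) =====
-- def fourSumCountNaive(nums1: list[int], nums2: list[int], nums3: list[int], nums4: list[int]) -> int:
--     count = 0
--     for i in nums1:
--         for j in nums2:
--             for k in nums3:
--                 for l in nums4:
--                     if sum([i,j,k,l]) == 0:
--                         count += 1
--     return count
-- ===== SOURCE B (Python) =====
-- def fourSumCountNaive(nums1: list[int], nums2: list[int], nums3: list[int], nums4: list[int]) -> int:
--     sums = {}
--     for i in nums1: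
--         for j in nums2:
--             s = i + j
--             sums[s] = sums.get(s, 0) + 1
--     count = 0
--     for k in nums3:
--         for l in nums4:
--             count += sums.get(-(k + l), 0)
--     return count
-- ===== Notes on version B (the rewrite author's own statement) =====
-- stated objective: faster
-- what changed: Replaces the quadruple nested loop with a hash map of pairwise sums of nums1+nums2, then looks up the negated pairwise sums of nums3+nums4.
import Mathlib
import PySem

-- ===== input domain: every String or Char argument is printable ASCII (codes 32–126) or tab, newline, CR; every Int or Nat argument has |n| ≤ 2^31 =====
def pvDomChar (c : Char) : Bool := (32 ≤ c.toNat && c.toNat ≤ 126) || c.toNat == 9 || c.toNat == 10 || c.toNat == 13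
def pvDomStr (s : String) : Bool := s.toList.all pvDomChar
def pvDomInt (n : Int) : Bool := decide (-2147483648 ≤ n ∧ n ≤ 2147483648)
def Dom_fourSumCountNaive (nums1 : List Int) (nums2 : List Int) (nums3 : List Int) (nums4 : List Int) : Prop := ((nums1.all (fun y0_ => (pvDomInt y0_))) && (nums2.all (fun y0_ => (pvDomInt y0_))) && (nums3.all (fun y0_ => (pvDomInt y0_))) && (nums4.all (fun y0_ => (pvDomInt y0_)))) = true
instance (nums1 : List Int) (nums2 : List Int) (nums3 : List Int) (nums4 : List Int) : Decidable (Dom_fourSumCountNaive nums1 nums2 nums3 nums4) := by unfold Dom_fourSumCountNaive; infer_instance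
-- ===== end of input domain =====

-- ===== PORT A =====
-- header: B replaces A's quadruple nested loop by a hash map of pairwise sums (objective: faster, O(n^4) -> O(n^2))
def fourSumCountNaive (nums1 : List Int) (nums2 : List Int) (nums3 : List Int) (nums4 : List Int) : Int :=
  nums1.foldl (fun count i =>
    nums2.foldl (fun count j =>
      nums3.foldl (fun count k =>
        nums4.foldl (fun count l =>
          if ([i, j, k, l].sum) = 0 then count + 1 else count) count) count) count) 0

-- ===== PORT B =====
def fourSumCountNaive_alt (nums1 : List Int) (nums2 : List Int) (nums3 : List Int) (nums4 : List Int) : Int :=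
  let sums : PySem.Dict Int Int :=
    nums1.foldl (fun d i =>
      nums2.foldl (fun d j =>
        d.insert (i + j) (d.getD (i + j) 0 + 1)) d) PySem.Dict.empty
  nums3.foldl (fun count k =>
    nums4.foldl (fun count l =>
      count + sums.getD (-(k + l)) 0) count) 0

-- ===== PRECONDITION & SPEC =====
def Spec_fourSumCountNaive (nums1 : List Int) (nums2 : List Int) (nums3 : List Int) (nums4 : List Int) (out : Int) : Prop := out = fourSumCountNaive_alt nums1 nums2 nums3 nums4
instance (nums1 : List Int) (nums2 : List Int) (nums3 : List Int) (nums4 : List Int) (out : Int) : Decidable (Spec_fourSumCountNaive nums1 nums2 nums3 nums4 out) := by unfold Spec_fourSumCountNaive; infer_instance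

-- ===== CLAIM (what is proved, stated in full; the proofs are below) =====
def Claim_equal_fourSumCountNaive : Prop := ∀ (nums1 : List Int) (nums2 : List Int) (nums3 : List Int) (nums4 : List Int), Dom_fourSumCountNaive nums1 nums2 nums3 nums4 → Spec_fourSumCountNaive nums1 nums2 nums3 nums4 (fourSumCountNaive nums1 nums2 nums3 nums4)

-- ===== LEMMAS AND PROOFS =====

-- swap a double list-sum (the sum-exchange step used repeatedly below)
theorem pvSumSwap (xs ys : List Int) (f : Int → Int → Int) :
    (xs.map (fun x => (ys.map (fun y => f x y)).sum)).sum
    = (ys.map (fun y => (xs.map (fun x => f x y)).sum)).sum := by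
  induction xs with
  | nil => simp
  | cons x xs ih =>
      simp only [List.map_cons, List.sum_cons, ih, PySem.List.sum_map_add_int]

-- A's value as a quadruple sum of 0/1 indicators
theorem pvA_sum (nums1 nums2 nums3 nums4 : List Int) :
    fourSumCountNaive nums1 nums2 nums3 nums4
    = (nums1.map (fun i => (nums2.map (fun j => (nums3.map (fun k =>
        (nums4.map (fun l => if i + j + k + l = 0 then (1:Int) else 0)).sum)).sum)).sum)).sum := by
  unfold fourSumCountNaive
  have h4 : ∀ (i j k c : Int),
      nums4.foldl (fun count l => if ([i, j, k, l].sum) = 0 then count + 1 else count) c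
      = c + (nums4.map (fun l => if i + j + k + l = 0 then (1:Int) else 0)).sum := by
    intro i j k c
    have hb : (fun (count l : Int) => if ([i, j, k, l].sum) = 0 then count + 1 else count)
        = fun (count l : Int) => count + (if i + j + k + l = 0 then (1:Int) else 0) := by
      funext c' l
      simp only [List.sum_cons, List.sum_nil]
      split_ifs with h1 h2 h2 <;> omega
    rw [hb, PySem.List.foldl_add]
  simp only [h4]
  have h3 : ∀ (i j c : Int),
      nums3.foldl (fun count k => count + (nums4.map (fun l => if i + j + k + l = 0 then (1:Int) else 0)).sum) c
      = c + (nums3.map (fun k => (nums4.map (fun l => if i + j + k + l = 0 then (1:Int) else 0)).sum)).sum := by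
    intro i j c; rw [PySem.List.foldl_add]
  simp only [h3]
  have h2 : ∀ (i c : Int),
      nums2.foldl (fun count j => count + (nums3.map (fun k => (nums4.map (fun l => if i + j + k + l = 0 then (1:Int) else 0)).sum)).sum) c
      = c + (nums2.map (fun j => (nums3.map (fun k => (nums4.map (fun l => if i + j + k + l = 0 then (1:Int) else 0)).sum)).sum)).sum := by
    intro i c; rw [PySem.List.foldl_add]
  simp only [h2]
  rw [PySem.List.foldl_add]
  simp

-- the dict-building double loop of B is Counter of the list of pairwise sums
theorem pvSums_eq_counter (nums1 nums2 : List Int) :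
    nums1.foldl (fun d i =>
      nums2.foldl (fun d j =>
        d.insert (i + j) (d.getD (i + j) 0 + 1)) d) PySem.Dict.empty
    = PySem.Dict.counter (nums1.flatMap (fun i => nums2.map (fun j => i + j))) := by
  rw [← PySem.Dict.foldl_insert_getD_add_one_eq_counter, List.foldl_flatMap]
  simp only [List.foldl_map]

-- one Counter lookup is the double indicator sum
theorem pvCount_eq (nums1 nums2 : List Int) (k l : Int) :
    (PySem.Dict.counter (nums1.flatMap (fun i => nums2.map (fun j => i + j)))).getD (-(k + l)) 0
    = (nums1.map (fun i => (nums2.map (fun j => if i + j + k + l = 0 then (1:Int) else 0)).sum)).sum := by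
  rw [PySem.Dict.getD_counter, List.count_eq_countP, List.countP_flatMap]
  push_cast
  rw [List.map_map]
  refine congrArg List.sum (List.map_congr_left ?_)
  intro i _
  simp only [Function.comp, List.countP_map]
  rw [← PySem.List.sum_map_ite_one_zero ((fun x => x == -(k + l)) ∘ fun j => i + j) nums2]
  refine congrArg List.sum (List.map_congr_left ?_)
  intro j _
  simp only [Function.comp_apply, beq_iff_eq]
  by_cases h : i + j + k + l = 0
  · rw [if_pos h, if_pos (show i + j = -(k + l) by omega)]
  · rw [if_neg h, if_neg (show ¬ i + j = -(k + l) by omega)]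

-- B's value as the same quadruple sum (outer pairs first)
theorem pvB_sum (nums1 nums2 nums3 nums4 : List Int) :
    fourSumCountNaive_alt nums1 nums2 nums3 nums4
    = (nums3.map (fun k => (nums4.map (fun l => (nums1.map (fun i =>
        (nums2.map (fun j => if i + j + k + l = 0 then (1:Int) else 0)).sum)).sum)).sum)).sum := by
  unfold fourSumCountNaive_alt
  rw [pvSums_eq_counter]
  simp only [pvCount_eq]
  have h4 : ∀ (k c : Int),
      nums4.foldl (fun count l => count + (nums1.map (fun i => (nums2.map (fun j => if i + j + k + l = 0 then (1:Int) else 0)).sum)).sum) c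
      = c + (nums4.map (fun l => (nums1.map (fun i => (nums2.map (fun j => if i + j + k + l = 0 then (1:Int) else 0)).sum)).sum)).sum := by
    intro k c; rw [PySem.List.foldl_add]
  simp only [h4]
  rw [PySem.List.foldl_add]
  simp

-- ===== VERDICT (by name: the statement is the Claim_ definition above) =====
theorem fourSumCountNaive_spec : Claim_equal_fourSumCountNaive := by
  intro nums1 nums2 nums3 nums4 _
  unfold Spec_fourSumCountNaive
  rw [pvA_sum, pvB_sum]
  have s1 : ∀ i : Int,
      (nums2.map (fun j => (nums3.map (fun k => (nums4.map (fun l => if i + j + k + l = 0 then (1:Int) else 0)).sum)).sum)).sum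
      = (nums3.map (fun k => (nums2.map (fun j => (nums4.map (fun l => if i + j + k + l = 0 then (1:Int) else 0)).sum)).sum)).sum :=
    fun i => pvSumSwap nums2 nums3 _
  simp only [s1]
  rw [pvSumSwap nums1 nums3 _]
  have s2 : ∀ k i : Int,
      (nums2.map (fun j => (nums4.map (fun l => if i + j + k + l = 0 then (1:Int) else 0)).sum)).sum
      = (nums4.map (fun l => (nums2.map (fun j => if i + j + k + l = 0 then (1:Int) else 0)).sum)).sum :=
    fun k i => pvSumSwap nums2 nums4 _
  simp only [s2]
  have s3 : ∀ k : Int,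
      (nums1.map (fun i => (nums4.map (fun l => (nums2.map (fun j => if i + j + k + l = 0 then (1:Int) else 0)).sum)).sum)).sum
      = (nums4.map (fun l => (nums1.map (fun i => (nums2.map (fun j => if i + j + k + l = 0 then (1:Int) else 0)).sum)).sum)).sum :=
    fun k => pvSumSwap nums1 nums4 _
  simp only [s3]
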